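-- pv_equiv track=rewrite | github.com/Hulyamr13/hackerrank | Cheese and Random Toppings.py | get_remainder_squarefree
-- ===== SOURCE A (Python) =====
-- def binomial_coefficient(n, k):
--     if n < k:
--         return 0
--     ans = 1
--     k = min(k, n - k)
--     for i in range(1, k + 1):
--         if n % i == 0:
--             ans *= n // i
--         elif ans % i == 0:
--             ans = (ans // i) * n
--         else:
--             ans = (ans * n) // i
--         n -= 1
--     return ans
--
-- def lucas_theorem(n, k, p):
--     ans = 1
--     while k > 0:
--         tmp_n = n % p
--         tmp_k = k % p
--         ans *= binomial_coefficient(tmp_n, tmp_k) % p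
--         ans %= p
--         n //= p
--         k //= p
--     return ans
--
-- def get_remainder_squarefree(n, k, m):
--     primes = [2, 3, 5, 7, 11, 13, 17, 19, 23, 29, 31, 37, 41, 43, 47]
--     ans = -1
--     last = 1
--
--     if m == 1:
--         return 0
--
--     for prime in primes:
--         if m % prime != 0:
--             continue
--
--         rem = lucas_theorem(n, k, prime)
--
--         if ans == -1:
--             ans = rem
--         else:
--             for j in range(50):
--                 if (ans + (last * j)) % prime == rem:
--                     ans = ans + (last * j)
--                     break
--         last *= prime
--         m //= prime
--
--     return ans
-- ===== SOURCE B (Python) =====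
-- def _binom(n, k):
--     # exact C(n, k) by the rising-product formula
--     if k < 0 or n < k:
--         return 0
--     ans = 1
--     for i in range(1, k + 1):
--         ans = ans * (n - k + i) // i
--     return ans
--
--
-- def _inv_mod(a, p):
--     # a^(p-2) mod p by repeated multiplication (Fermat; p is a small prime)
--     r = 1
--     for _ in range(p - 2):
--         r = r * a % p
--     return r
--
--
-- def _lucas(n, k, p):
--     if k <= 0:
--         return 1
--     return _binom(n % p, k % p) * _lucas(n // p, k // p, p) % p
--
--
-- def get_remainder_squarefree(n, k, m):
--     if m == 1:
--         return 0
--     ans = -1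
--     last = 1
--     for prime in [2, 3, 5, 7, 11, 13, 17, 19, 23, 29, 31, 37, 41, 43, 47]:
--         if m % prime != 0:
--             continue
--         rem = _lucas(n, k, prime)
--         if ans == -1:
--             ans = rem
--         else:
--             # CRT lift: the unique j in [0, prime) with (ans + last*j) % prime == rem
--             j = (rem - ans) * _inv_mod(last % prime, prime) % prime
--             ans += last * j
--         last *= prime
--         m //= prime
--     return ans
-- ===== Notes on version B (the rewrite author's own statement) =====
-- stated objective: simpler
-- what changed: B replaces A's brute-force `for j in range(50)` CRT residue search by a direct Garner lift using a Fermat modular inverse, A's three-branch divisibility-case binomial loop by the plain rising-product formula, and A's iterative Lucas while-loop by a recursion.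
import Mathlib
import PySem

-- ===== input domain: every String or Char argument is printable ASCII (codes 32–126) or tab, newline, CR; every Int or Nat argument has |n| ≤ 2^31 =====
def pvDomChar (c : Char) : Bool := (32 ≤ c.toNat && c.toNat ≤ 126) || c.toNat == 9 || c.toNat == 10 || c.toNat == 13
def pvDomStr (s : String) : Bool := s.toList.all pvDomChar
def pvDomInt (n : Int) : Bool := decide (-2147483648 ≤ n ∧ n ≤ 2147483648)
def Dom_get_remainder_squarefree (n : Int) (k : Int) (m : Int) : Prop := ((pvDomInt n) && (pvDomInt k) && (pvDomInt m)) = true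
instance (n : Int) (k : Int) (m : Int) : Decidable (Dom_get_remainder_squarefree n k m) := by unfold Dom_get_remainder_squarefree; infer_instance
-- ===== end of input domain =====

-- B replaces A's brute-force `for j in range(50)` CRT residue search by a direct
-- modular-inverse (Garner) lift, A's three-branch binomial loop by the
-- rising-product formula, and A's iterative Lucas loop by recursion (objective: simpler).

-- ===== PORT A =====

-- loop body of binomial_coefficient: state (ans, n)
def pvBinStepA (s : Int × Int) (i : Int) : Int × Int :=
  (if PySem.Int.mod s.2 i = 0 then s.1 * PySem.Int.floordiv s.2 i
   else if PySem.Int.mod s.1 i = 0 then PySem.Int.floordiv s.1 i * s.2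
   else PySem.Int.floordiv (s.1 * s.2) i,
   s.2 - 1)

def binomial_coefficient (n k : Int) : Int :=
  if n < k then 0
  else ((PySem.List.pyRange 1 (min k (n - k) + 1) 1).foldl pvBinStepA (1, n)).1

-- while-loop of lucas_theorem, run on fuel k.toNat (k strictly decreases each
-- iteration, so the fuel never runs out); the `2 ≤ p` side of the guard only
-- makes the loop total (A always calls it with a prime p ≥ 2)
def pvLucasGoA : Nat → Int → Int → Int → Int → Int
  | 0, _, _, _, ans => ans
  | fuel + 1, n, k, p, ans =>
      if 0 < k ∧ 2 ≤ p then
        pvLucasGoA fuel (PySem.Int.floordiv n p) (PySem.Int.floordiv k p) p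
          (PySem.Int.mod
            (ans * PySem.Int.mod (binomial_coefficient (PySem.Int.mod n p) (PySem.Int.mod k p)) p) p)
      else ans

def lucas_theorem (n k p : Int) : Int := pvLucasGoA k.toNat n k p 1

-- `for j in range(50): if (ans + last*j) % prime == rem: ans += last*j; break`
def pvSearchA (ans last rem p : Int) : List Int → Int
  | [] => ans
  | j :: js =>
      if PySem.Int.mod (ans + last * j) p = rem then ans + last * j
      else pvSearchA ans last rem p js

-- body of the `for prime in primes` loop: state (ans, last, m)
def pvStepA (n k : Int) (s : Int × Int × Int) (prime : Int) : Int × Int × Int :=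
  if PySem.Int.mod s.2.2 prime ≠ 0 then s
  else
    (if s.1 = -1 then lucas_theorem n k prime
     else pvSearchA s.1 s.2.1 (lucas_theorem n k prime) prime (PySem.List.pyRange 0 50 1),
     s.2.1 * prime, PySem.Int.floordiv s.2.2 prime)

def get_remainder_squarefree (n : Int) (k : Int) (m : Int) : Int :=
  if m = 1 then 0
  else
    (([2, 3, 5, 7, 11, 13, 17, 19, 23, 29, 31, 37, 41, 43, 47] : List Int).foldl
      (pvStepA n k) (-1, 1, m)).1

-- ===== PORT B =====

-- _binom: exact C(n, k) by the rising-product formula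
def pvBinomB (n k : Int) : Int :=
  if k < 0 ∨ n < k then 0
  else (PySem.List.pyRange 1 (k + 1) 1).foldl
    (fun ans i => PySem.Int.floordiv (ans * (n - k + i)) i) 1

-- _inv_mod: a^(p-2) mod p by repeated multiplication
def pvInvModB (a p : Int) : Int :=
  (PySem.List.pyRange 0 (p - 2) 1).foldl (fun r _ => PySem.Int.mod (r * a) p) 1

-- _lucas, recursive, on fuel k.toNat (its `k` strictly decreases, so the fuel
-- never runs out); the `2 ≤ p` side of the guard only makes the recursion total
def pvLucasBGo : Nat → Int → Int → Int → Int
  | 0, _, _, _ => 1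
  | fuel + 1, n, k, p =>
      if 0 < k ∧ 2 ≤ p then
        PySem.Int.mod
          (pvBinomB (PySem.Int.mod n p) (PySem.Int.mod k p) *
            pvLucasBGo fuel (PySem.Int.floordiv n p) (PySem.Int.floordiv k p) p) p
      else 1

def pvLucasB (n k p : Int) : Int := pvLucasBGo k.toNat n k p

-- body of B's `for prime in primes` loop: state (ans, last, m)
def pvStepB (n k : Int) (s : Int × Int × Int) (prime : Int) : Int × Int × Int :=
  if PySem.Int.mod s.2.2 prime ≠ 0 then s
  else
    (if s.1 = -1 then pvLucasB n k prime
     else s.1 + s.2.1 *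
       PySem.Int.mod ((pvLucasB n k prime - s.1) * pvInvModB (PySem.Int.mod s.2.1 prime) prime) prime,
     s.2.1 * prime, PySem.Int.floordiv s.2.2 prime)

def get_remainder_squarefree_alt (n : Int) (k : Int) (m : Int) : Int :=
  if m = 1 then 0
  else
    (([2, 3, 5, 7, 11, 13, 17, 19, 23, 29, 31, 37, 41, 43, 47] : List Int).foldl
      (pvStepB n k) (-1, 1, m)).1

-- ===== PRECONDITION & SPEC =====
def Spec_get_remainder_squarefree (n : Int) (k : Int) (m : Int) (out : Int) : Prop := out = get_remainder_squarefree_alt n k m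
instance (n : Int) (k : Int) (m : Int) (out : Int) : Decidable (Spec_get_remainder_squarefree n k m out) := by unfold Spec_get_remainder_squarefree; infer_instance

-- ===== CLAIM (what is proved, stated in full; the proofs are below) =====
def Claim_equal_get_remainder_squarefree : Prop := ∀ (n : Int) (k : Int) (m : Int), Dom_get_remainder_squarefree n k m → Spec_get_remainder_squarefree n k m (get_remainder_squarefree n k m)

-- ===== LEMMAS AND PROOFS =====

-- exact-division workhorse: all three of A's branches compute the same exact quotient
theorem pv_div_exact {a v d C : Int} (hd : 0 < d) (h : a * v = C * d) :
    (if PySem.Int.mod v d = 0 then a * PySem.Int.floordiv v d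
     else if PySem.Int.mod a d = 0 then PySem.Int.floordiv a d * v
     else PySem.Int.floordiv (a * v) d) = C := by
  rw [PySem.Int.mod_eq_emod_of_pos hd, PySem.Int.mod_eq_emod_of_pos hd,
      PySem.Int.floordiv_eq_ediv_of_pos hd, PySem.Int.floordiv_eq_ediv_of_pos hd,
      PySem.Int.floordiv_eq_ediv_of_pos hd]
  have hd0 : d ≠ 0 := by omega
  split_ifs with h1 h2
  · have hdv : d ∣ v := Int.dvd_of_emod_eq_zero h1
    rw [← Int.mul_ediv_assoc a hdv, h, Int.mul_ediv_cancel C hd0]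
  · have hda : d ∣ a := Int.dvd_of_emod_eq_zero h2
    rw [← Int.mul_ediv_assoc' v hda, h, Int.mul_ediv_cancel C hd0]
  · rw [h, Int.mul_ediv_cancel C hd0]

theorem pvBinStepA_eq (N j : Nat) (hjN : j < N) :
    pvBinStepA ((N.choose j : Int), (N : Int) - (j : Int)) ((j : Int) + 1)
      = ((N.choose (j + 1) : Int), (N : Int) - (j : Int) - 1) := by
  have hd : (0 : Int) < (j : Int) + 1 := by positivity
  have key : ((N.choose j : Nat) : Int) * ((N : Int) - (j : Int))
      = (N.choose (j + 1) : Int) * ((j : Int) + 1) := by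
    have h2 := congrArg (Nat.cast (R := Int)) (Nat.choose_succ_right_eq N j)
    push_cast [Nat.cast_sub hjN.le] at h2
    linarith
  unfold pvBinStepA
  exact Prod.ext (pv_div_exact hd key) rfl

theorem pvBinLoopA (N : Nat) : ∀ (t j : Nat), j + t ≤ N →
    (PySem.List.pyRange ((j : Int) + 1) (((j + t : Nat) : Int) + 1) 1).foldl pvBinStepA
        ((N.choose j : Int), (N : Int) - (j : Int))
      = ((N.choose (j + t) : Int), (N : Int) - ((j + t : Nat) : Int)) := by
  intro t
  induction t with
  | zero =>
      intro j h
      rw [PySem.List.pyRange_one_eq_nil (by push_cast; omega)]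
      simp
  | succ t ih =>
      intro j h
      rw [PySem.List.pyRange_one_cons (by push_cast; omega)]
      simp only [List.foldl_cons]
      rw [pvBinStepA_eq N j (by omega)]
      have e1 : ((j : Int) + 1) + 1 = ((j + 1 : Nat) : Int) + 1 := by push_cast; ring
      have e2 : (((j + (t + 1) : Nat)) : Int) + 1 = (((j + 1) + t : Nat) : Int) + 1 := by
        push_cast; ring
      have e3 : (N : Int) - (j : Int) - 1 = (N : Int) - ((j + 1 : Nat) : Int) := by
        push_cast; ring
      rw [e1, e2, e3, ih (j + 1) (by omega)]
      rw [show j + 1 + t = j + (t + 1) from by omega]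

theorem pvBinomA_choose (N K : Nat) :
    binomial_coefficient (N : Int) (K : Int)
      = if (N : Int) < (K : Int) then 0 else ((N.choose K : Nat) : Int) := by
  unfold binomial_coefficient
  by_cases hlt : (N : Int) < (K : Int)
  · rw [if_pos hlt, if_pos hlt]
  · rw [if_neg hlt, if_neg hlt]
    have hKN : K ≤ N := by exact_mod_cast not_lt.mp hlt
    have hmin : min (K : Int) ((N : Int) - (K : Int)) = ((min K (N - K) : Nat) : Int) := by
      push_cast [Nat.cast_sub hKN]; omega
    have hloop := pvBinLoopA N (min K (N - K)) 0 (by omega)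
    have e1 : (((0 : Nat) : Int) + 1) = 1 := by norm_num
    have e2 : ((N.choose 0 : Nat) : Int) = 1 := by norm_num
    have e3 : (N : Int) - ((0 : Nat) : Int) = (N : Int) := by norm_num
    rw [e1, e2, e3, Nat.zero_add] at hloop
    rw [hmin, hloop]
    rcases le_total K (N - K) with hle | hge
    · rw [min_eq_left hle]
    · rw [min_eq_right hge]
      exact congrArg _ (Nat.choose_symm hKN)

theorem pvBinLoopB (N K : Nat) (hKN : K ≤ N) : ∀ (t j : Nat),
    (PySem.List.pyRange ((j : Int) + 1) (((j + t : Nat) : Int) + 1) 1).foldl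
        (fun ans i => PySem.Int.floordiv (ans * ((N : Int) - (K : Int) + i)) i)
        (((N - K + j).choose j : Int))
      = (((N - K + (j + t)).choose (j + t) : Int)) := by
  intro t
  induction t with
  | zero =>
      intro j
      rw [PySem.List.pyRange_one_eq_nil (by push_cast; omega)]
      simp
  | succ t ih =>
      intro j
      rw [PySem.List.pyRange_one_cons (by push_cast; omega)]
      simp only [List.foldl_cons]
      have hd0 : ((j : Int) + 1) ≠ 0 := by omega
      have ev : (N : Int) - (K : Int) + ((j : Int) + 1) = ((N - K + j + 1 : Nat) : Int) := by
        push_cast [Nat.cast_sub hKN]; ring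
      have h2 : (N - K + j).choose j * (N - K + j + 1) = (N - K + j + 1).choose (j + 1) * (j + 1) := by
        have h3 := Nat.succ_mul_choose_eq (N - K + j) j
        simp only [Nat.succ_eq_add_one] at h3
        rw [mul_comm ((N - K + j).choose j) (N - K + j + 1)]
        exact h3
      have key : ((N - K + j).choose j : Int) * ((N : Int) - (K : Int) + ((j : Int) + 1))
          = ((N - K + (j + 1)).choose (j + 1) : Int) * ((j : Int) + 1) := by
        rw [ev, show N - K + (j + 1) = N - K + j + 1 from by omega]
        exact_mod_cast h2
      have hstep : PySem.Int.floordiv (((N - K + j).choose j : Int) * ((N : Int) - (K : Int) + ((j : Int) + 1)))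
          ((j : Int) + 1) = ((N - K + (j + 1)).choose (j + 1) : Int) := by
        rw [PySem.Int.floordiv_eq_ediv_of_pos (by positivity), key,
          Int.mul_ediv_cancel _ hd0]
      have e1 : ((j : Int) + 1) + 1 = ((j + 1 : Nat) : Int) + 1 := by push_cast; ring
      have e2 : (((j + (t + 1) : Nat)) : Int) + 1 = (((j + 1) + t : Nat) : Int) + 1 := by
        push_cast; ring
      rw [hstep, e1, e2, ih (j + 1)]
      rw [show j + 1 + t = j + (t + 1) from by omega]

theorem pvBinomB_choose (N K : Nat) :
    pvBinomB (N : Int) (K : Int)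
      = if (N : Int) < (K : Int) then 0 else ((N.choose K : Nat) : Int) := by
  unfold pvBinomB
  by_cases hlt : (N : Int) < (K : Int)
  · rw [if_pos (Or.inr hlt), if_pos hlt]
  · rw [if_neg ?_, if_neg hlt]
    swap
    · rintro (h | h)
      · omega
      · exact hlt h
    have hKN : K ≤ N := by exact_mod_cast not_lt.mp hlt
    have hloop := pvBinLoopB N K hKN K 0
    have e1 : (((0 : Nat) : Int) + 1) = 1 := by norm_num
    have e2 : (((N - K + 0).choose 0 : Nat) : Int) = 1 := by norm_num
    rw [e1, e2, Nat.zero_add] at hloop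
    rw [hloop]
    rw [show N - K + K = N from by omega]

theorem pvBinom_eq (n k : Int) (hn : 0 ≤ n) (hk : 0 ≤ k) :
    binomial_coefficient n k = pvBinomB n k := by
  obtain ⟨N, rfl⟩ : ∃ N : Nat, n = (N : Int) := ⟨n.toNat, by omega⟩
  obtain ⟨K, rfl⟩ : ∃ K : Nat, k = (K : Int) := ⟨k.toNat, by omega⟩
  rw [pvBinomA_choose N K, pvBinomB_choose N K]

-- modular-arithmetic helpers
theorem pv_emod_mul_left (a b p : Int) : a % p * b % p = a * b % p := by
  rw [Int.mul_emod, Int.emod_emod_of_dvd a dvd_rfl, ← Int.mul_emod]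

theorem pv_emod_mul_right (a b p : Int) : a * (b % p) % p = a * b % p := by
  rw [Int.mul_emod, Int.emod_emod_of_dvd b dvd_rfl, ← Int.mul_emod]

theorem pv_mod3 (x y z p : Int) : x * (y % p) % p * z % p = x * (y * z % p) % p := by
  have l1 : x * (y % p) % p * z % p = x * (y % p) * z % p := pv_emod_mul_left _ z p
  have l2 : x * (y % p) * z = x * z * (y % p) := by ring
  have l3 : x * z * (y % p) % p = x * z * y % p := pv_emod_mul_right (x * z) y p
  have r1 : x * (y * z % p) % p = x * (y * z) % p := pv_emod_mul_right x (y * z) p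
  rw [l1, l2, l3, r1]
  ring_nf

theorem pvLucasBGo_bounds (p : Int) (hp : 2 ≤ p) : ∀ (f : Nat) (n k : Int),
    0 ≤ pvLucasBGo f n k p ∧ pvLucasBGo f n k p < p := by
  intro f n k
  cases f with
  | zero => simp only [pvLucasBGo]; omega
  | succ f =>
      rw [pvLucasBGo]
      split_ifs with h
      · rw [PySem.Int.mod_eq_emod_of_pos (by omega)]
        exact ⟨Int.emod_nonneg _ (by omega), Int.emod_lt_of_pos _ (by omega)⟩
      · omega

theorem pvLucasB_bounds (n k p : Int) (hp : 2 ≤ p) :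
    0 ≤ pvLucasB n k p ∧ pvLucasB n k p < p := pvLucasBGo_bounds p hp k.toNat n k

theorem pv_div_toNat_lt (k p : Int) (hk : 0 < k) (hp : 2 ≤ p) :
    (PySem.Int.floordiv k p).toNat < k.toNat := by
  rw [PySem.Int.floordiv_eq_ediv_of_pos (by omega)]
  have h3 : k / p < k := by
    rw [Int.ediv_lt_iff_lt_mul (by omega : (0 : Int) < p)]
    nlinarith
  have h4 : 0 ≤ k / p := Int.ediv_nonneg (by omega) (by omega)
  omega

theorem pvLucasBGo_fuel (p : Int) : ∀ (f f' : Nat) (n k : Int),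
    k.toNat ≤ f → k.toNat ≤ f' → pvLucasBGo f n k p = pvLucasBGo f' n k p := by
  intro f
  induction f with
  | zero =>
      intro f' n k h h'
      cases f' with
      | zero => rfl
      | succ f' =>
          have hc : ¬ (0 < k ∧ 2 ≤ p) := by omega
          show (1 : Int) = pvLucasBGo (f' + 1) n k p
          rw [pvLucasBGo, if_neg hc]
  | succ f ih =>
      intro f' n k h h'
      cases f' with
      | zero =>
          have hc : ¬ (0 < k ∧ 2 ≤ p) := by omega
          show pvLucasBGo (f + 1) n k p = (1 : Int)
          rw [pvLucasBGo, if_neg hc]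
      | succ f'' =>
          rw [pvLucasBGo, pvLucasBGo]
          by_cases hc : 0 < k ∧ 2 ≤ p
          · rw [if_pos hc, if_pos hc]
            have hdec := pv_div_toNat_lt k p hc.1 hc.2
            rw [ih f'' (PySem.Int.floordiv n p) (PySem.Int.floordiv k p)
              (by omega) (by omega)]
          · rw [if_neg hc, if_neg hc]

theorem pvLucasGoA_eq (p : Int) (hp : 2 ≤ p) : ∀ (K : Nat) (n k ans : Int),
    k.toNat ≤ K → 0 ≤ ans → ans < p →
    pvLucasGoA K n k p ans = ans * pvLucasB n k p % p := by
  intro K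
  induction K with
  | zero =>
      intro n k ans hK h0 h1
      have hk0 : k.toNat = 0 := by omega
      show ans = ans * pvLucasB n k p % p
      unfold pvLucasB
      rw [hk0]
      show ans = ans * 1 % p
      rw [mul_one, Int.emod_eq_of_lt h0 h1]
  | succ K ih =>
      intro n k ans hK h0 h1
      by_cases hk : 0 < k ∧ 2 ≤ p
      · rw [pvLucasGoA, if_pos hk]
        have hppos : (0 : Int) < p := by omega
        have hpne : p ≠ 0 := by omega
        have hBeq : pvLucasB n k p
            = (pvBinomB (PySem.Int.mod n p) (PySem.Int.mod k p) *
                pvLucasBGo K (PySem.Int.floordiv n p) (PySem.Int.floordiv k p) p) % p := by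
          unfold pvLucasB
          obtain ⟨m, hm⟩ : ∃ m, k.toNat = m + 1 := ⟨k.toNat - 1, by omega⟩
          rw [hm, pvLucasBGo, if_pos hk, PySem.Int.mod_eq_emod_of_pos hppos]
          have hdec := pv_div_toNat_lt k p hk.1 hk.2
          rw [pvLucasBGo_fuel p m K (PySem.Int.floordiv n p) (PySem.Int.floordiv k p)
            (by omega) (by omega)]
        have hGo : pvLucasBGo K (PySem.Int.floordiv n p) (PySem.Int.floordiv k p) p
            = pvLucasB (PySem.Int.floordiv n p) (PySem.Int.floordiv k p) p := by
          unfold pvLucasB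
          have hdec := pv_div_toNat_lt k p hk.1 hk.2
          exact pvLucasBGo_fuel p K (PySem.Int.floordiv k p).toNat _ _ (by omega) le_rfl
        rw [hBeq, hGo]
        simp only [PySem.Int.mod_eq_emod_of_pos hppos,
          PySem.Int.floordiv_eq_ediv_of_pos hppos]
        have hbin : binomial_coefficient (n % p) (k % p) = pvBinomB (n % p) (k % p) :=
          pvBinom_eq _ _ (Int.emod_nonneg n hpne) (Int.emod_nonneg k hpne)
        have hdec2 : (k / p).toNat ≤ K := by
          have h5 := pv_div_toNat_lt k p hk.1 hk.2
          rw [PySem.Int.floordiv_eq_ediv_of_pos hppos] at h5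
          omega
        have ha' : 0 ≤ ans * (binomial_coefficient (n % p) (k % p) % p) % p :=
          Int.emod_nonneg _ hpne
        have hb' : ans * (binomial_coefficient (n % p) (k % p) % p) % p < p :=
          Int.emod_lt_of_pos _ hppos
        rw [ih _ _ _ hdec2 ha' hb', hbin]
        exact pv_mod3 ans _ _ p
      · rw [pvLucasGoA, if_neg hk]
        have hk0 : k.toNat = 0 := by omega
        show ans = ans * pvLucasB n k p % p
        unfold pvLucasB
        rw [hk0]
        show ans = ans * 1 % p
        rw [mul_one, Int.emod_eq_of_lt h0 h1]

theorem pvLucas_eq (n k p : Int) (hp : 2 ≤ p) :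
    lucas_theorem n k p = pvLucasB n k p := by
  unfold lucas_theorem
  rw [pvLucasGoA_eq p hp k.toNat n k 1 le_rfl (by omega) (by omega), one_mul]
  obtain ⟨h0, h1⟩ := pvLucasB_bounds n k p hp
  exact Int.emod_eq_of_lt h0 h1

-- cast of an emod into ZMod
theorem pv_cast_emod (x : Int) (q : Nat) :
    ((x % (q : Int) : Int) : ZMod q) = (x : ZMod q) := by
  have h : x % (q : Int) ≡ x [ZMOD (q : Nat)] := Int.emod_emod_of_dvd x dvd_rfl
  exact (ZMod.intCast_eq_intCast_iff _ _ _).mpr h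

theorem pvInvFold (q : Nat) (hq2 : 2 ≤ q) (A : Int) : ∀ (l : List Int) (r : Int),
    0 ≤ r → r < (q : Int) →
    0 ≤ l.foldl (fun r _ => PySem.Int.mod (r * A) (q : Int)) r ∧
    l.foldl (fun r _ => PySem.Int.mod (r * A) (q : Int)) r < (q : Int) ∧
    ((l.foldl (fun r _ => PySem.Int.mod (r * A) (q : Int)) r : Int) : ZMod q)
      = (r : ZMod q) * (A : ZMod q) ^ l.length := by
  intro l
  induction l with
  | nil => intro r h0 h1; simpa using ⟨h0, h1⟩
  | cons x t ih =>
      intro r h0 h1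
      have hppos : (0 : Int) < (q : Int) := by exact_mod_cast (by omega : 0 < q)
      have hpne : (q : Int) ≠ 0 := by omega
      simp only [List.foldl_cons]
      rw [PySem.Int.mod_eq_emod_of_pos hppos]
      obtain ⟨i0, i1, i2⟩ := ih (r * A % (q : Int)) (Int.emod_nonneg _ hpne)
        (Int.emod_lt_of_pos _ hppos)
      refine ⟨i0, i1, ?_⟩
      rw [i2, pv_cast_emod]
      push_cast
      rw [List.length_cons, pow_succ]
      ring

theorem pvInvModB_spec (q : Nat) (hq : q.Prime) (last : Int)
    (hl : ¬ ((q : Int) ∣ last)) :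
    ((pvInvModB (last % (q : Int)) (q : Int) : Int) : ZMod q) * (last : ZMod q) = 1 := by
  have hq2 : 2 ≤ q := hq.two_le
  haveI : Fact q.Prime := ⟨hq⟩
  unfold pvInvModB
  have hqc : (1 : Int) < (q : Int) := by exact_mod_cast hq.one_lt
  obtain ⟨-, -, hcast⟩ := pvInvFold q hq2 (last % (q : Int))
    (PySem.List.pyRange 0 ((q : Int) - 2) 1) 1 (by omega) hqc
  rw [hcast, pv_cast_emod]
  have hlen : (PySem.List.pyRange 0 ((q : Int) - 2) 1).length = q - 2 := by
    rw [PySem.List.length_pyRange_one]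
    omega
  rw [hlen]
  have hA0 : (last : ZMod q) ≠ 0 := by
    intro h
    exact hl ((ZMod.intCast_zmod_eq_zero_iff_dvd last q).mp h)
  have hfermat : (last : ZMod q) ^ (q - 1) = 1 := ZMod.pow_card_sub_one_eq_one hA0
  have hstep : (last : ZMod q) ^ (q - 2) * (last : ZMod q) = (last : ZMod q) ^ (q - 1) := by
    rw [← pow_succ]
    congr 1
    omega
  rw [Int.cast_one, one_mul, hstep, hfermat]

-- first-hit characterisation of A's range(50) search
theorem pvSearchA_first (ans last rem p jstar : Int) :
    ∀ l : List Int, l.Pairwise (· < ·) → jstar ∈ l →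
    PySem.Int.mod (ans + last * jstar) p = rem →
    (∀ x ∈ l, PySem.Int.mod (ans + last * x) p = rem → jstar ≤ x) →
    pvSearchA ans last rem p l = ans + last * jstar := by
  intro l
  induction l with
  | nil => intro _ hmem; exact absurd hmem (List.not_mem_nil)
  | cons h t ih =>
      intro hpw hmem hcond hmin
      rw [pvSearchA]
      split_ifs with hh
      · have hjh : jstar ≤ h := hmin h List.mem_cons_self hh
        have : jstar = h := by
          rcases List.mem_cons.mp hmem with rfl | hmt
          · rfl
          · exact absurd ((List.pairwise_cons.mp hpw).1 jstar hmt) (by omega)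
        rw [this]
      · have hne : jstar ≠ h := by
          intro he; rw [he] at hcond; exact hh hcond
        have hmt : jstar ∈ t := by
          rcases List.mem_cons.mp hmem with he | hmt
          · exact absurd he hne
          · exact hmt
        exact ih (List.pairwise_cons.mp hpw).2 hmt hcond
          (fun x hx hc => hmin x (List.mem_cons_of_mem h hx) hc)

theorem pvCombine (q : Nat) (hq : q.Prime) (hq47 : q ≤ 47) (ans last rem : Int)
    (hl : ¬ ((q : Int) ∣ last)) (hr0 : 0 ≤ rem) (hr1 : rem < (q : Int)) :
    pvSearchA ans last rem (q : Int) (PySem.List.pyRange 0 50 1)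
      = ans + last * PySem.Int.mod ((rem - ans) * pvInvModB (PySem.Int.mod last (q : Int)) (q : Int)) (q : Int) := by
  have hq2 : 2 ≤ q := hq.two_le
  have hppos : (0 : Int) < (q : Int) := by exact_mod_cast (by omega : 0 < q)
  have hpne : (q : Int) ≠ 0 := by omega
  have hq47' : (q : Int) ≤ 47 := by exact_mod_cast hq47
  rw [PySem.Int.mod_eq_emod_of_pos hppos, PySem.Int.mod_eq_emod_of_pos hppos]
  set inv := pvInvModB (last % (q : Int)) (q : Int) with hinv
  have hinv1 : ((inv : Int) : ZMod q) * (last : ZMod q) = 1 := pvInvModB_spec q hq last hl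
  set jstar := (rem - ans) * inv % (q : Int) with hjstar
  have hj0 : 0 ≤ jstar := Int.emod_nonneg _ hpne
  have hj1 : jstar < (q : Int) := Int.emod_lt_of_pos _ hppos
  have hcast : ((ans + last * jstar : Int) : ZMod q) = (rem : ZMod q) := by
    rw [hjstar]
    push_cast [pv_cast_emod]
    calc (ans : ZMod q) + (last : ZMod q) * (((rem : ZMod q) - (ans : ZMod q)) * ((inv : Int) : ZMod q))
        = (ans : ZMod q) + ((rem : ZMod q) - (ans : ZMod q)) * (((inv : Int) : ZMod q) * (last : ZMod q)) := by ring
      _ = (rem : ZMod q) := by rw [hinv1]; ring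
  have hcond : PySem.Int.mod (ans + last * jstar) (q : Int) = rem := by
    rw [PySem.Int.mod_eq_emod_of_pos hppos]
    have hmodeq : (ans + last * jstar) ≡ rem [ZMOD (q : Nat)] :=
      (ZMod.intCast_eq_intCast_iff _ _ _).mp hcast
    have h2 : (ans + last * jstar) % (q : Int) = rem % (q : Int) := hmodeq
    rw [h2, Int.emod_eq_of_lt hr0 hr1]
  have hmin : ∀ x ∈ PySem.List.pyRange 0 50 1,
      PySem.Int.mod (ans + last * x) (q : Int) = rem → jstar ≤ x := by
    intro x hx hcx
    have hx0 : 0 ≤ x := (PySem.List.mem_pyRange_one.mp hx).1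
    rw [PySem.Int.mod_eq_emod_of_pos hppos] at hcx
    have hcx' : (ans + last * x) % (q : Int) = (ans + last * jstar) % (q : Int) := by
      rw [PySem.Int.mod_eq_emod_of_pos hppos] at hcond
      rw [hcx, hcond]
    have hmodeq : (ans + last * x) ≡ (ans + last * jstar) [ZMOD (q : Nat)] := hcx'
    have hcast2 : ((ans + last * x : Int) : ZMod q) = ((ans + last * jstar : Int) : ZMod q) :=
      (ZMod.intCast_eq_intCast_iff _ _ _).mpr hmodeq
    push_cast at hcast2
    have hxz : ((x : Int) : ZMod q) = ((jstar : Int) : ZMod q) := by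
      have h3 : (last : ZMod q) * ((x : ZMod q) - (jstar : ZMod q)) = 0 := by
        linear_combination hcast2
      have h5 : (x : ZMod q) - (jstar : ZMod q) = 0 := by
        calc (x : ZMod q) - (jstar : ZMod q)
            = ((inv : Int) : ZMod q) * (last : ZMod q) * ((x : ZMod q) - (jstar : ZMod q)) := by
              rw [hinv1, one_mul]
          _ = ((inv : Int) : ZMod q) * ((last : ZMod q) * ((x : ZMod q) - (jstar : ZMod q))) := by
              rw [mul_assoc]
          _ = 0 := by rw [h3, mul_zero]
      have h6 := sub_eq_zero.mp h5
      exact_mod_cast h6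
    have hdvd : ((q : Nat) : Int) ∣ jstar - x :=
      Int.ModEq.dvd ((ZMod.intCast_eq_intCast_iff _ _ _).mp hxz)
    obtain ⟨t, ht⟩ := hdvd
    by_cases htn : t ≤ 0
    · have h9 : (q : Int) * t ≤ 0 := by nlinarith
      linarith [ht, h9]
    · have h9 : (q : Int) ≤ (q : Int) * t := by nlinarith
      linarith [ht, h9, hj1, hx0]
  exact pvSearchA_first ans last rem (q : Int) jstar (PySem.List.pyRange 0 50 1)
    (PySem.List.pairwise_lt_pyRange_one 0 50)
    (PySem.List.mem_pyRange_one.mpr ⟨hj0, by omega⟩) hcond hmin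

-- one arm of the prime loop
theorem pvStep_eq (n k : Int) (s : Int × Int × Int) (q : Nat) (hq : q.Prime)
    (h47 : q ≤ 47) (hndvd : ¬ ((q : Int) ∣ s.2.1)) :
    pvStepA n k s (q : Int) = pvStepB n k s (q : Int) := by
  have hq2 : (2 : Int) ≤ (q : Int) := by exact_mod_cast hq.two_le
  have hrem : lucas_theorem n k (q : Int) = pvLucasB n k (q : Int) := pvLucas_eq n k _ hq2
  obtain ⟨hr0, hr1⟩ := pvLucasB_bounds n k (q : Int) hq2
  unfold pvStepA pvStepB
  by_cases hskip : PySem.Int.mod s.2.2 (q : Int) ≠ 0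
  · rw [if_pos hskip, if_pos hskip]
  · rw [if_neg hskip, if_neg hskip]
    refine Prod.ext ?_ rfl
    simp only [hrem]
    by_cases hans : s.1 = -1
    · rw [if_pos hans, if_pos hans]
    · rw [if_neg hans, if_neg hans]
      exact pvCombine q hq h47 s.1 s.2.1 (pvLucasB n k (q : Int)) hndvd hr0 hr1

def PvInv (l : List Int) (last : Int) : Prop :=
  ∀ p ∈ l, ∃ q : Nat, p = (q : Int) ∧ q.Prime ∧ q ≤ 47 ∧ ¬ ((q : Int) ∣ last)

theorem pvStepB_last (n k : Int) (s : Int × Int × Int) (p : Int) :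
    (pvStepB n k s p).2.1 = s.2.1 ∨ (pvStepB n k s p).2.1 = s.2.1 * p := by
  unfold pvStepB
  split_ifs
  · exact Or.inl rfl
  · exact Or.inr rfl
  · exact Or.inr rfl

theorem pvFold_eq (n k : Int) : ∀ (l : List Int) (s : Int × Int × Int),
    PvInv l s.2.1 → l.Pairwise (· < ·) →
    l.foldl (pvStepA n k) s = l.foldl (pvStepB n k) s := by
  intro l
  induction l with
  | nil => intro _ _ _; rfl
  | cons p t ih =>
      intro s hinv hpw
      obtain ⟨q, rfl, hq, h47, hndvd⟩ := hinv _ List.mem_cons_self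
      simp only [List.foldl_cons]
      rw [pvStep_eq n k s q hq h47 hndvd]
      apply ih
      · intro r hr
        obtain ⟨q', hrq', hq', h47', hndvd'⟩ := hinv r (List.mem_cons_of_mem _ hr)
        refine ⟨q', hrq', hq', h47', ?_⟩
        have hlt : ((q : Int)) < r := (List.pairwise_cons.mp hpw).1 r hr
        have hqq' : q' ≠ q := by
          intro he
          rw [hrq', he] at hlt
          omega
        rcases pvStepB_last n k s (q : Int) with hcase | hcase
        · rw [hcase]; exact hndvd'
        · rw [hcase]
          intro hdvd
          have hpr : Prime ((q' : Nat) : Int) := Nat.prime_iff_prime_int.mp hq'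
          rcases hpr.dvd_mul.mp hdvd with hd1 | hd2
          · exact hndvd' hd1
          · have h8 : q' ∣ q := by exact_mod_cast hd2
            exact hqq' ((Nat.prime_dvd_prime_iff_eq hq' hq).mp h8)
      · exact (List.pairwise_cons.mp hpw).2

theorem pvInvOne (p : Int) (q : Nat) (hq : q.Prime) (h47 : q ≤ 47) (hc : p = (q : Int)) :
    ∃ q' : Nat, p = (q' : Int) ∧ q'.Prime ∧ q' ≤ 47 ∧ ¬ ((q' : Int) ∣ (1 : Int)) := by
  refine ⟨q, hc, hq, h47, ?_⟩
  intro hd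
  have h1 := Int.le_of_dvd one_pos hd
  have h2 := hq.two_le
  omega

theorem pv_main : ∀ (n k m : Int),
    get_remainder_squarefree n k m = get_remainder_squarefree_alt n k m := by
  intro n k m
  unfold get_remainder_squarefree get_remainder_squarefree_alt
  split_ifs with h1
  · rfl
  · congr 1
    apply pvFold_eq
    · intro p hp
      fin_cases hp
      · exact pvInvOne _ 2 (by norm_num) (by norm_num) (by norm_num)
      · exact pvInvOne _ 3 (by norm_num) (by norm_num) (by norm_num)
      · exact pvInvOne _ 5 (by norm_num) (by norm_num) (by norm_num)
      · exact pvInvOne _ 7 (by norm_num) (by norm_num) (by norm_num)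
      · exact pvInvOne _ 11 (by norm_num) (by norm_num) (by norm_num)
      · exact pvInvOne _ 13 (by norm_num) (by norm_num) (by norm_num)
      · exact pvInvOne _ 17 (by norm_num) (by norm_num) (by norm_num)
      · exact pvInvOne _ 19 (by norm_num) (by norm_num) (by norm_num)
      · exact pvInvOne _ 23 (by norm_num) (by norm_num) (by norm_num)
      · exact pvInvOne _ 29 (by norm_num) (by norm_num) (by norm_num)
      · exact pvInvOne _ 31 (by norm_num) (by norm_num) (by norm_num)
      · exact pvInvOne _ 37 (by norm_num) (by norm_num) (by norm_num)
      · exact pvInvOne _ 41 (by norm_num) (by norm_num) (by norm_num)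
      · exact pvInvOne _ 43 (by norm_num) (by norm_num) (by norm_num)
      · exact pvInvOne _ 47 (by norm_num) (by norm_num) (by norm_num)
    · decide

-- ===== VERDICT (by name: the statement is the Claim_ definition above) =====
theorem get_remainder_squarefree_spec : Claim_equal_get_remainder_squarefree := by
  intro n k m _
  unfold Spec_get_remainder_squarefree
  exact pv_main n k m
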